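-- pv_equiv track=rewrite | github.com/alextruesdale/Moodys-image-processing | text_dictionaries/xml_firm_search/codebase/xmlSheetSearch.py | manual_begin_end
-- ===== SOURCE A (Python) =====
-- from operator import itemgetter
--
-- def manual_begin_end(year, page_index):
--     """define beginning and endpoints of manual in terms of areas to search."""
--
--     manual_begin_end_dict = {
--         '1920': [[-1, False], [133, True], [1513, False]],
--         '1921': [[-1, False], [158, True], [1751, False]],
--         '1922': [[-1, False], [193, True], [2077, False]],
--         '1923': [[-1, False], [159, True], [2414, False]],
--         '1924': [[-1, False], [310, True], [2878, False]],
--         '1925': [[-1, False], [225, True], [2405, False]],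
--         '1926': [[-1, False], [270, True], [2665, False]],
--         '1927': [[-1, False], [306, True], [3057, False]],
--         '1928': [[-1, False], [348, True], [3425, False]],
--         '1929': [[-1, False], [391, True], [3485, False]],
--         '1940': [[-1, False], [386, True], [3581, False]],
--         '1941': [[-1, False], [329, True], [3466, False]]
--     }
--
--     difference_list = sorted([[item, page_index - item[0]] for item in
--                               manual_begin_end_dict[year] if page_index - item[0] > 0],
--                               key=itemgetter(1))
--
--     begin_end_value = difference_list[0][0][1]
--     return begin_end_value
-- ===== SOURCE B (Python) =====
-- def manual_begin_end(year, page_index):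
--     """define beginning and endpoints of manual in terms of areas to search."""
--
--     # per-year (begin, end) page boundaries of the manual body
--     bounds = {
--         '1920': (133, 1513),
--         '1921': (158, 1751),
--         '1922': (193, 2077),
--         '1923': (159, 2414),
--         '1924': (310, 2878),
--         '1925': (225, 2405),
--         '1926': (270, 2665),
--         '1927': (306, 3057),
--         '1928': (348, 3425),
--         '1929': (391, 3485),
--         '1940': (386, 3581),
--         '1941': (329, 3466),
--     }
--     begin, end = bounds[year]
--     # the nearest boundary strictly below page_index carries flag True
--     # exactly when page_index lies in the half-open interval (begin, end]
--     return begin < page_index <= end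
-- ===== Notes on version B (the rewrite author's own statement) =====
-- stated objective: simpler
-- what changed: Replaced the build-difference-pairs + sort + take-first pipeline over the sentinel list by a per-year (begin,end) table and a direct interval test begin < page_index <= end (no list, no sort).
import Mathlib
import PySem

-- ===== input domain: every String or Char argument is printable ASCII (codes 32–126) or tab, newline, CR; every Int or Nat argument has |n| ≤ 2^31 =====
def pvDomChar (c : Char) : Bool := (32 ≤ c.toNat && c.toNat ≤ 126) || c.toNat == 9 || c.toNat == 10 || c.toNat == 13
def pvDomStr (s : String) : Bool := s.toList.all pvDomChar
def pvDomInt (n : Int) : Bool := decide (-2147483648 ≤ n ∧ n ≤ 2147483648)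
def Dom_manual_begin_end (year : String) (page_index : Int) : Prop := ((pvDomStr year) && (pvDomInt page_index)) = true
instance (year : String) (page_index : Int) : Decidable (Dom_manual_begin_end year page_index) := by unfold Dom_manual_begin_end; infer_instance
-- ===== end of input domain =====

-- B replaces A's filter + sort-by-difference + take-first pipeline over the
-- sentinel list by a per-year (begin, end) table and a direct interval test.

-- ===== PORT A =====
-- the literal dict of A (insertion order; inner [int, bool] pairs as Int × Bool)
def mbeDict : PySem.Dict String (List (Int × Bool)) := PySem.Dict.ofList
  [("1920", [(-1, false), (133, true), (1513, false)]),
   ("1921", [(-1, false), (158, true), (1751, false)]),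
   ("1922", [(-1, false), (193, true), (2077, false)]),
   ("1923", [(-1, false), (159, true), (2414, false)]),
   ("1924", [(-1, false), (310, true), (2878, false)]),
   ("1925", [(-1, false), (225, true), (2405, false)]),
   ("1926", [(-1, false), (270, true), (2665, false)]),
   ("1927", [(-1, false), (306, true), (3057, false)]),
   ("1928", [(-1, false), (348, true), (3425, false)]),
   ("1929", [(-1, false), (391, true), (3485, false)]),
   ("1940", [(-1, false), (386, true), (3581, false)]),
   ("1941", [(-1, false), (329, true), (3466, false)])]

-- A's core on the looked-up year list: comprehension with filter, sorted by the
-- difference (itemgetter(1)), then difference_list[0][0][1].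
def mbeCoreA (items : List (Int × Bool)) (page_index : Int) : Bool :=
  let difference_list := PySem.List.sorted
    ((items.filter (fun item => decide (page_index - item.1 > 0))).map
      (fun item => (item, page_index - item.1)))
    (fun p => p.2)
  match difference_list with
  | [] => false          -- difference_list[0] raises IndexError here; excluded by Pre_
  | d :: _ => d.1.2

def manual_begin_end (year : String) (page_index : Int) : Bool :=
  match mbeDict.get? year with
  | none => false        -- KeyError in Python; excluded by Pre_
  | some items => mbeCoreA items page_index

-- ===== PORT B =====
-- B's per-year (begin, end) bounds table
def mbeBounds : PySem.Dict String (Int × Int) := PySem.Dict.ofList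
  [("1920", (133, 1513)),
   ("1921", (158, 1751)),
   ("1922", (193, 2077)),
   ("1923", (159, 2414)),
   ("1924", (310, 2878)),
   ("1925", (225, 2405)),
   ("1926", (270, 2665)),
   ("1927", (306, 3057)),
   ("1928", (348, 3425)),
   ("1929", (391, 3485)),
   ("1940", (386, 3581)),
   ("1941", (329, 3466))]

def manual_begin_end_alt (year : String) (page_index : Int) : Bool :=
  match mbeBounds.get? year with
  | none => false        -- KeyError in Python; excluded by Pre_
  | some be => decide (be.1 < page_index ∧ page_index ≤ be.2)

-- ===== PRECONDITION & SPEC =====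
-- Pre_ excludes exactly A's exceptions: a year not in the dict (KeyError) and
-- page_index ≤ -1, where the candidate list is empty and difference_list[0] raises IndexError.
def Pre_manual_begin_end (year : String) (page_index : Int) : Prop :=
  (mbeDict.get? year).isSome ∧ 0 ≤ page_index
instance (year : String) (page_index : Int) : Decidable (Pre_manual_begin_end year page_index) := by
  unfold Pre_manual_begin_end; infer_instance

def pvWitness_manual_begin_end : String × Int := ("1925", 300)

def Spec_manual_begin_end (year : String) (page_index : Int) (out : Bool) : Prop := out = manual_begin_end_alt year page_index
instance (year : String) (page_index : Int) (out : Bool) : Decidable (Spec_manual_begin_end year page_index out) := by unfold Spec_manual_begin_end; infer_instance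

-- ===== CLAIM =====
def Claim_equal_manual_begin_end : Prop := ∀ (year : String) (page_index : Int), Dom_manual_begin_end year page_index → Pre_manual_begin_end year page_index → Spec_manual_begin_end year page_index (manual_begin_end year page_index)

-- ===== LEMMAS AND PROOFS =====

-- every year's list has the shape [(-1, false), (b, true), (e, false)] with -1 < b < e;
-- on that shape, with 0 ≤ p, A's core equals the interval test b < p ≤ e.
theorem mbeCore_eq (b e p : Int) (hb : -1 < b) (he : b < e) (hp : 0 ≤ p) :
    mbeCoreA [(-1, false), (b, true), (e, false)] p
      = decide (b < p ∧ p ≤ e) := by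
  unfold mbeCoreA
  have c1 : (-1 : Int) < p := by omega
  rcases (by omega : p ≤ b ∨ b < p) with h1 | h1
  · -- only the (-1, False) sentinel survives the filter
    have c2 : ¬ b < p := by omega
    have c3 : ¬ e < p := by omega
    simp [List.filter, List.map, hp, c1, c2, c3, PySem.List.sorted,
      PySem.List.insertBy]
  · rcases (by omega : p ≤ e ∨ e < p) with h2 | h2
    · -- candidates (-1, False) and (b, True); b is the nearer boundary
      have c3 : ¬ e < p := by omega
      have hs : PySem.List.sorted
          [(((-1 : Int), false), p + 1), ((b, true), p - b)] (fun q => q.2)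
          = [((b, true), p - b), (((-1 : Int), false), p + 1)] := by
        apply PySem.List.sorted_eq_of_perm_of_pairwise_lt
        · exact List.reverse_perm [(((-1 : Int), false), p + 1), ((b, true), p - b)]
        · simp; omega
      simp [List.filter, List.map, hp, c1, h1, c3, hs]
      omega
    · -- all three candidates; e is the nearest boundary
      have hs : PySem.List.sorted
          [(((-1 : Int), false), p + 1), ((b, true), p - b), ((e, false), p - e)]
          (fun q => q.2)
          = [((e, false), p - e), ((b, true), p - b), (((-1 : Int), false), p + 1)] := by
        apply PySem.List.sorted_eq_of_perm_of_pairwise_lt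
        · exact List.reverse_perm
            [(((-1 : Int), false), p + 1), ((b, true), p - b), ((e, false), p - e)]
        · simp; omega
      simp [List.filter, List.map, hp, c1, h1, h2, hs]

-- ===== VERDICT =====
theorem manual_begin_end_spec : Claim_equal_manual_begin_end := by
  intro year page_index _ hpre
  obtain ⟨hy, hp⟩ := hpre
  unfold Spec_manual_begin_end manual_begin_end manual_begin_end_alt
  have hmem : year ∈ mbeDict.keys := by
    by_contra hnot
    rw [← PySem.Dict.get?_eq_none_iff_not_mem_keys] at hnot
    simp [hnot] at hy
  have hkeys : mbeDict.keys = ["1920", "1921", "1922", "1923", "1924", "1925",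
      "1926", "1927", "1928", "1929", "1940", "1941"] := by decide
  rw [hkeys] at hmem
  simp only [List.mem_cons, List.not_mem_nil, or_false] at hmem
  rcases hmem with h | h | h | h | h | h | h | h | h | h | h | h <;> subst h <;>
    · rw [show mbeDict.get? _ = some _ from rfl,
        show mbeBounds.get? _ = some _ from rfl]
      exact mbeCore_eq _ _ _ (by decide) (by decide) hp
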